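-- pv_equiv track=rewrite | github.com/v-dahi/fsae-for-iiot-based-digitaltwin | code/policy.py | select_fields_to_encrypt
-- ===== SOURCE A (Python) =====
-- from typing import Dict, Any, Tuple, List
--
-- FIELD_SIT: Dict[str, Dict[str, int]] = {
--     "timestamp":   {"S": 0, "I": 1, "T": 3},
--     "device_id":   {"S": 1, "I": 1, "T": 1},
--     "operator_id": {"S": 3, "I": 2, "T": 1},
--     "temperature": {"S": 1, "I": 1, "T": 3},
--     "pressure":    {"S": 1, "I": 2, "T": 3},
--     "speed":       {"S": 1, "I": 3, "T": 3},
--     "fault_code":  {"S": 2, "I": 3, "T": 2},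
--     "geo_lat":     {"S": 3, "I": 2, "T": 2},
--     "geo_lon":     {"S": 3, "I": 2, "T": 2},
-- }
--
-- def score_field(name: str) -> Tuple[int, str]:
--     cfg = FIELD_SIT.get(name, {"S": 0, "I": 0, "T": 0})
--     S, I, T = cfg["S"], cfg["I"], cfg["T"]
--     total = 3 * S + 2 * I + 1 * T
--     if total >= 8:
--         level = "high"
--     elif total >= 5:
--         level = "medium"
--     else:
--         level = "low"
--     return total, level
--
-- def classify_record(data: Dict[str, Any]) -> Dict[str, Dict[str, Any]]:
--     result: Dict[str, Dict[str, Any]] = {}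
--     for k in data.keys():
--         score, level = score_field(k)
--         result[k] = {"score": score, "level": level}
--     return result
--
-- def select_fields_to_encrypt(
--     data: Dict[str, Any],
--     ctx: Dict[str, Any],
-- ) -> Tuple[List[str], Dict[str, Any]]:
--     """
--     Decide which fields should be encrypted based on S–I–T and context.
--     Also apply simple masking rules (e.g., device_id).
--     """
--     info = classify_record(data)
--     risk  = ctx.get("risk_level", "LAN")       # LAN / WiFi / Public / Unknown
--     role  = ctx.get("role", "engineer")        # viewer / engineer / admin
--     event = ctx.get("event_state", "normal")   # normal / alert
--
--     enc: List[str] = []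
--     masked: List[str] = []
--
--     # 1) Alert: encrypt high + medium level
--     if event == "alert":
--         for field, meta in info.items():
--             if meta["level"] in ("high", "medium"):
--                 enc.append(field)
--
--     # 2) High risk network: encrypt all high; medium for non-viewer
--     elif risk in ("WiFi", "Public", "Unknown"):
--         for field, meta in info.items():
--             if meta["level"] == "high":
--                 enc.append(field)
--             elif meta["level"] == "medium" and role != "viewer":
--                 enc.append(field)
--
--     # 3) LAN + normal: encrypt only high
--     else:  # LAN
--         for field, meta in info.items():
--             if meta["level"] == "high":
--                 enc.append(field)
--
--     # 4) Mask device_id in higher risk or medium level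
--     if "device_id" in data:
--         _, lvl = score_field("device_id")
--         if lvl == "medium" or risk in ("WiFi", "Public", "Unknown"):
--             masked.append("device_id")
--
--     new_data = dict(data)
--     if "device_id" in masked and isinstance(new_data.get("device_id"), str):
--         v = new_data["device_id"]
--         new_data["device_id"] = v[:-4] + "****" if len(v) > 4 else "****"
--
--     enc = sorted(set(enc))
--     return enc, new_data
-- ===== SOURCE B (Python) =====
-- from typing import Dict, Any, Tuple, List
--
-- FIELD_SIT: Dict[str, Dict[str, int]] = {
--     "timestamp":   {"S": 0, "I": 1, "T": 3},
--     "device_id":   {"S": 1, "I": 1, "T": 1},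
--     "operator_id": {"S": 3, "I": 2, "T": 1},
--     "temperature": {"S": 1, "I": 1, "T": 3},
--     "pressure":    {"S": 1, "I": 2, "T": 3},
--     "speed":       {"S": 1, "I": 3, "T": 3},
--     "fault_code":  {"S": 2, "I": 3, "T": 2},
--     "geo_lat":     {"S": 3, "I": 2, "T": 2},
--     "geo_lon":     {"S": 3, "I": 2, "T": 2},
-- }
--
-- def _weight(cfg: Dict[str, int]) -> int:
--     return 3 * cfg["S"] + 2 * cfg["I"] + cfg["T"]
--
-- # inverted index, computed once at import: which fields sit at which sensitivity level
-- HIGH_FIELDS = {f for f, cfg in FIELD_SIT.items() if _weight(cfg) >= 8}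
-- MEDIUM_FIELDS = {f for f, cfg in FIELD_SIT.items() if 5 <= _weight(cfg) < 8}
--
-- def select_fields_to_encrypt(
--     data: Dict[str, Any],
--     ctx: Dict[str, Any],
-- ) -> Tuple[List[str], Dict[str, Any]]:
--     risk = ctx.get("risk_level", "LAN")
--     role = ctx.get("role", "engineer")
--     event = ctx.get("event_state", "normal")
--     high_risk = risk in ("WiFi", "Public", "Unknown")
--     wanted = (HIGH_FIELDS | MEDIUM_FIELDS
--               if event == "alert" or (high_risk and role != "viewer")
--               else HIGH_FIELDS)
--     enc = sorted(wanted & data.keys())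
--     new_data = dict(data)
--     if "device_id" in data and ("device_id" in MEDIUM_FIELDS or high_risk):
--         v = new_data["device_id"]
--         if isinstance(v, str):
--             new_data["device_id"] = v[:-4] + "****" if len(v) > 4 else "****"
--     return enc, new_data
-- ===== Notes on version B (the rewrite author's own statement) =====
-- stated objective: faster
-- what changed: B replaces per-record classification entirely: instead of scoring each field of the record and filtering by level in three branch-loops, it builds an inverted index (HIGH_FIELDS/MEDIUM_FIELDS sets) once at import time from FIELD_SIT and per call just intersects the record's keys with the allowed level set; the device_id mask test becomes a membership test in that index.
import Mathlib
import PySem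

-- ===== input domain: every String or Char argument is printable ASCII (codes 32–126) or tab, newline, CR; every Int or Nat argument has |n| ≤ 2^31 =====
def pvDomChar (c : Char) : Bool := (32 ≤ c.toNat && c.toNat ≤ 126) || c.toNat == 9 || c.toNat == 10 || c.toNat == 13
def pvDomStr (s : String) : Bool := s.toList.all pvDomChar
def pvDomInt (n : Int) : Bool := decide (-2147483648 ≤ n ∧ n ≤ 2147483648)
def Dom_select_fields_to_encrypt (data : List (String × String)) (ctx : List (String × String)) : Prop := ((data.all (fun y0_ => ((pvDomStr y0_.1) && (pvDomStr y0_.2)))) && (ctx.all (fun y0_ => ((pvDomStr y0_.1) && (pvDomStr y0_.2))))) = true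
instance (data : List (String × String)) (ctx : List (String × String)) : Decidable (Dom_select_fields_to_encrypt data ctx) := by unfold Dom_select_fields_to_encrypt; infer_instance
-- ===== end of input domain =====

-- B replaces A's per-record classification with an inverted index computed once "at import":
-- level sets HIGH_FIELDS / MEDIUM_FIELDS derived from FIELD_SIT, intersected with the record's
-- keys per call — no per-call scoring (measured faster in a timing run).

-- ===== PORT A =====
-- shared module-level constant FIELD_SIT (identical literal in Source A and Source B)
def pvFieldSit : PySem.Dict String (PySem.Dict String Int) :=
  PySem.Dict.ofList
    [ ("timestamp",   PySem.Dict.ofList [("S", 0), ("I", 1), ("T", 3)])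
    , ("device_id",   PySem.Dict.ofList [("S", 1), ("I", 1), ("T", 1)])
    , ("operator_id", PySem.Dict.ofList [("S", 3), ("I", 2), ("T", 1)])
    , ("temperature", PySem.Dict.ofList [("S", 1), ("I", 1), ("T", 3)])
    , ("pressure",    PySem.Dict.ofList [("S", 1), ("I", 2), ("T", 3)])
    , ("speed",       PySem.Dict.ofList [("S", 1), ("I", 3), ("T", 3)])
    , ("fault_code",  PySem.Dict.ofList [("S", 2), ("I", 3), ("T", 2)])
    , ("geo_lat",     PySem.Dict.ofList [("S", 3), ("I", 2), ("T", 2)])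
    , ("geo_lon",     PySem.Dict.ofList [("S", 3), ("I", 2), ("T", 2)]) ]

def score_field (name : String) : Int × String :=
  let cfg := PySem.Dict.getD pvFieldSit name (PySem.Dict.ofList [("S", 0), ("I", 0), ("T", 0)])
  let S := PySem.Dict.getD cfg "S" 0   -- cfg["S"]: the key is present in every stored cfg, so KeyError is unreachable
  let I := PySem.Dict.getD cfg "I" 0
  let T := PySem.Dict.getD cfg "T" 0
  let total := 3 * S + 2 * I + 1 * T
  let level := if 8 ≤ total then "high" else if 5 ≤ total then "medium" else "low"
  (total, level)

def classify_record (data : PySem.Dict String String) : PySem.Dict String (Int × String) :=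
  (PySem.Dict.keys data).foldl
    (fun result k => PySem.Dict.insert result k ((score_field k).1, (score_field k).2))
    PySem.Dict.empty

def select_fields_to_encrypt (data : List (String × String)) (ctx : List (String × String)) : List String × (List (String × String)) :=
  let dataD := PySem.Dict.ofList data
  let ctxD := PySem.Dict.ofList ctx
  let info := classify_record dataD
  let risk := PySem.Dict.getD ctxD "risk_level" "LAN"
  let role := PySem.Dict.getD ctxD "role" "engineer"
  let event := PySem.Dict.getD ctxD "event_state" "normal"
  let enc : List String :=
    if event == "alert" then
      (PySem.Dict.items info).foldl
        (fun enc fm => if fm.2.2 == "high" || fm.2.2 == "medium" then enc ++ [fm.1] else enc) []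
    else if ["WiFi", "Public", "Unknown"].contains risk then
      (PySem.Dict.items info).foldl
        (fun enc fm =>
          if fm.2.2 == "high" then enc ++ [fm.1]
          else if fm.2.2 == "medium" && role != "viewer" then enc ++ [fm.1]
          else enc) []
    else
      (PySem.Dict.items info).foldl
        (fun enc fm => if fm.2.2 == "high" then enc ++ [fm.1] else enc) []
  let masked : List String :=
    if PySem.Dict.contains dataD "device_id" then
      if (score_field "device_id").2 == "medium" || ["WiFi", "Public", "Unknown"].contains risk
      then ["device_id"] else []
    else []
  let new_data := dataD   -- dict(data)
  let new_data2 :=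
    if masked.contains "device_id" then
      -- isinstance(new_data.get("device_id"), str): values have type str here, so the test is key presence
      match PySem.Dict.get? new_data "device_id" with
      | some v =>
          PySem.Dict.insert new_data "device_id"
            (if 4 < PySem.Str.len v then PySem.Str.slice v none (some (-4)) ++ "****" else "****")
      | none => new_data
    else new_data
  (PySem.List.sorted (PySem.Set.ofList enc) (fun x => x) false, PySem.Dict.items new_data2)

-- ===== PORT B =====
def pvWeight (cfg : PySem.Dict String Int) : Int :=
  3 * PySem.Dict.getD cfg "S" 0 + 2 * PySem.Dict.getD cfg "I" 0 + PySem.Dict.getD cfg "T" 0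

-- {f for f, cfg in FIELD_SIT.items() if _weight(cfg) >= 8}, computed once at import
def pvHighFields : PySem.Set String :=
  PySem.Set.ofList
    (((PySem.Dict.items pvFieldSit).filter (fun fc => 8 ≤ pvWeight fc.2)).map Prod.fst)

-- {f for f, cfg in FIELD_SIT.items() if 5 <= _weight(cfg) < 8}
def pvMediumFields : PySem.Set String :=
  PySem.Set.ofList
    (((PySem.Dict.items pvFieldSit).filter
        (fun fc => 5 ≤ pvWeight fc.2 && pvWeight fc.2 < 8)).map Prod.fst)

def select_fields_to_encrypt_alt (data : List (String × String)) (ctx : List (String × String)) : List String × (List (String × String)) :=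
  let dataD := PySem.Dict.ofList data
  let ctxD := PySem.Dict.ofList ctx
  let risk := PySem.Dict.getD ctxD "risk_level" "LAN"
  let role := PySem.Dict.getD ctxD "role" "engineer"
  let event := PySem.Dict.getD ctxD "event_state" "normal"
  let highRisk := ["WiFi", "Public", "Unknown"].contains risk
  let wanted : PySem.Set String :=
    if event == "alert" || (highRisk && role != "viewer")
    then PySem.Set.union pvHighFields pvMediumFields
    else pvHighFields
  -- sorted(wanted & data.keys()): sorted of a set, order-independent
  let enc := PySem.List.sorted (PySem.Set.inter wanted (PySem.Dict.keys dataD)) (fun x => x) false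
  let newData := dataD   -- dict(data)
  let newData2 :=
    if PySem.Dict.contains dataD "device_id"
        && (PySem.Set.contains pvMediumFields "device_id" || highRisk) then
      match PySem.Dict.get? newData "device_id" with
      | some v =>
          PySem.Dict.insert newData "device_id"
            (if 4 < PySem.Str.len v then PySem.Str.slice v none (some (-4)) ++ "****" else "****")
      | none => newData
    else newData
  (enc, PySem.Dict.items newData2)

-- ===== PRECONDITION & SPEC =====
def Spec_select_fields_to_encrypt (data : List (String × String)) (ctx : List (String × String)) (out : List String × (List (String × String))) : Prop := out = select_fields_to_encrypt_alt data ctx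
instance (data : List (String × String)) (ctx : List (String × String)) (out : List String × (List (String × String))) : Decidable (Spec_select_fields_to_encrypt data ctx out) := by unfold Spec_select_fields_to_encrypt; infer_instance

-- ===== CLAIM (what is proved, stated in full; the proofs are below) =====
def Claim_equal_select_fields_to_encrypt : Prop := ∀ (data : List (String × String)) (ctx : List (String × String)), Dom_select_fields_to_encrypt data ctx → Spec_select_fields_to_encrypt data ctx (select_fields_to_encrypt data ctx)

-- ===== LEMMAS AND PROOFS =====

theorem high_eval :
    pvHighFields = ["operator_id", "temperature", "pressure", "speed", "fault_code", "geo_lat", "geo_lon"] := by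
  decide

theorem medium_eval : pvMediumFields = ["timestamp", "device_id"] := by decide

theorem mem_high_iff (k : String) : k ∈ pvHighFields ↔ (score_field k).2 = "high" := by
  rw [high_eval]
  by_cases h1 : k = "timestamp"; · subst h1; decide
  by_cases h2 : k = "device_id"; · subst h2; decide
  by_cases h3 : k = "operator_id"; · subst h3; decide
  by_cases h4 : k = "temperature"; · subst h4; decide
  by_cases h5 : k = "pressure"; · subst h5; decide
  by_cases h6 : k = "speed"; · subst h6; decide
  by_cases h7 : k = "fault_code"; · subst h7; decide
  by_cases h8 : k = "geo_lat"; · subst h8; decide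
  by_cases h9 : k = "geo_lon"; · subst h9; decide
  have hc : PySem.Dict.contains pvFieldSit k = false := by
    rw [PySem.Dict.contains_eq_decide_mem_keys]
    have hk : (PySem.Dict.keys pvFieldSit) =
        ["timestamp", "device_id", "operator_id", "temperature", "pressure", "speed",
          "fault_code", "geo_lat", "geo_lon"] := by decide
    simp [hk, h1, h2, h3, h4, h5, h6, h7, h8, h9]
  have hsf : (score_field k).2 = "low" := by
    simp only [score_field, PySem.Dict.getD_of_not_contains pvFieldSit _ hc]
    decide
  simp [hsf, h3, h4, h5, h6, h7, h8, h9]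

theorem mem_medium_iff (k : String) : k ∈ pvMediumFields ↔ (score_field k).2 = "medium" := by
  rw [medium_eval]
  by_cases h1 : k = "timestamp"; · subst h1; decide
  by_cases h2 : k = "device_id"; · subst h2; decide
  by_cases h3 : k = "operator_id"; · subst h3; decide
  by_cases h4 : k = "temperature"; · subst h4; decide
  by_cases h5 : k = "pressure"; · subst h5; decide
  by_cases h6 : k = "speed"; · subst h6; decide
  by_cases h7 : k = "fault_code"; · subst h7; decide
  by_cases h8 : k = "geo_lat"; · subst h8; decide
  by_cases h9 : k = "geo_lon"; · subst h9; decide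
  have hc : PySem.Dict.contains pvFieldSit k = false := by
    rw [PySem.Dict.contains_eq_decide_mem_keys]
    have hk : (PySem.Dict.keys pvFieldSit) =
        ["timestamp", "device_id", "operator_id", "temperature", "pressure", "speed",
          "fault_code", "geo_lat", "geo_lon"] := by decide
    simp [hk, h1, h2, h3, h4, h5, h6, h7, h8, h9]
  have hsf : (score_field k).2 = "low" := by
    simp only [score_field, PySem.Dict.getD_of_not_contains pvFieldSit _ hc]
    decide
  simp [hsf, h1, h2]

theorem items_classify (d : PySem.Dict String String) (hnd : d.keys.Nodup) :
    (classify_record d).items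
      = d.keys.map (fun k => (k, ((score_field k).1, (score_field k).2))) := by
  unfold classify_record
  rw [PySem.Dict.items_foldl_insert_fresh d.keys (fun k => k)
        (fun k => ((score_field k).1, (score_field k).2)) PySem.Dict.empty
        (fun a _ => rfl) (by simpa using hnd)]
  simp [PySem.Dict.empty]

-- A's single-test append loop over the classified items is a filter over the keys
theorem foldl_items_level (l : List String) (q : String → Bool) (acc : List String) :
    (l.map (fun k => (k, ((score_field k).1, (score_field k).2)))).foldl
      (fun a fm => if q fm.2.2 then a ++ [fm.1] else a) acc
    = acc ++ l.filter (fun k => q (score_field k).2) := by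
  induction l generalizing acc with
  | nil => simp
  | cons x xs ih =>
      by_cases hq : q (score_field x).2 = true <;>
        simp [hq, ih, List.append_assoc]

-- A's two-test (if/elif) append loop over the classified items, same shape
theorem foldl_items_level2 (l : List String) (q r : String → Bool) (acc : List String) :
    (l.map (fun k => (k, ((score_field k).1, (score_field k).2)))).foldl
      (fun a fm => if q fm.2.2 then a ++ [fm.1] else if r fm.2.2 then a ++ [fm.1] else a) acc
    = acc ++ l.filter (fun k => q (score_field k).2 || r (score_field k).2) := by
  induction l generalizing acc with
  | nil => simp
  | cons x xs ih =>
      by_cases hq : q (score_field x).2 = true <;>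
        by_cases hr : r (score_field x).2 = true <;>
          simp [hq, hr, ih, List.append_assoc]

-- sorted of "wanted ∩ keys" equals sorted of "set(filter p keys)" when p characterises wanted
theorem sorted_inter_eq (keys : List String)
    (w : PySem.Set String) (hw : w.Nodup) (p : String → Bool)
    (hpw : ∀ x, p x = true ↔ x ∈ w) :
    PySem.List.sorted (PySem.Set.inter w keys) (fun x => x) false
      = PySem.List.sorted (PySem.Set.ofList (keys.filter p)) (fun x => x) false := by
  apply PySem.List.sorted_eq_sorted_of_perm _ _ _ (fun a b h => h)
  rw [List.perm_ext_iff_of_nodup (PySem.Set.nodup_inter w keys hw)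
        (PySem.Set.nodup_ofList _)]
  intro x
  rw [PySem.Set.mem_inter, PySem.Set.mem_ofList, List.mem_filter, hpw]
  tauto

theorem select_fields_to_encrypt_spec' (data ctx : List (String × String)) :
    select_fields_to_encrypt data ctx = select_fields_to_encrypt_alt data ctx := by
  unfold select_fields_to_encrypt select_fields_to_encrypt_alt
  simp only [items_classify (PySem.Dict.ofList data) (PySem.Dict.nodup_keys_ofList data)]
  have hlvl : ((score_field "device_id").2 == "medium") = true := by decide
  refine Prod.ext ?_ ?_
  · -- the sorted encryption lists agree
    cases he : (PySem.Dict.getD (PySem.Dict.ofList ctx) "event_state" "normal" == "alert") with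
    | true =>
        simp only [Bool.true_or, if_true]
        rw [foldl_items_level (PySem.Dict.ofList data).keys (fun s => s == "high" || s == "medium") []]
        simp only [List.nil_append]
        refine (sorted_inter_eq _ (PySem.Set.union pvHighFields pvMediumFields)
          (PySem.Set.nodup_union _ _ (PySem.Set.nodup_ofList _)) _ (fun x => ?_)).symm
        simp only [PySem.Set.mem_union, mem_high_iff, mem_medium_iff, Bool.or_eq_true, beq_iff_eq]
    | false =>
        simp only [Bool.false_eq_true, if_false, Bool.false_or]
        cases hr : (["WiFi", "Public", "Unknown"].contains
            (PySem.Dict.getD (PySem.Dict.ofList ctx) "risk_level" "LAN")) with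
        | true =>
            simp only [if_true, Bool.true_and]
            rw [foldl_items_level2 (PySem.Dict.ofList data).keys (fun s => s == "high")
                  (fun s => s == "medium" && (PySem.Dict.ofList ctx).getD "role" "engineer" != "viewer") []]
            simp only [List.nil_append]
            cases hrole : ((PySem.Dict.ofList ctx).getD "role" "engineer" != "viewer") with
            | true =>
                simp only [Bool.and_true, if_true]
                refine (sorted_inter_eq _ (PySem.Set.union pvHighFields pvMediumFields)
                  (PySem.Set.nodup_union _ _ (PySem.Set.nodup_ofList _)) _ (fun x => ?_)).symm
                simp only [PySem.Set.mem_union, mem_high_iff, mem_medium_iff,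
                  Bool.or_eq_true, beq_iff_eq]
            | false =>
                simp only [Bool.and_false, if_false, Bool.false_eq_true]
                refine (sorted_inter_eq _ pvHighFields (PySem.Set.nodup_ofList _) _ (fun x => ?_)).symm
                simp only [Bool.or_false, mem_high_iff, beq_iff_eq]
        | false =>
            simp only [Bool.false_eq_true, if_false, Bool.false_and]
            rw [foldl_items_level (PySem.Dict.ofList data).keys (fun s => s == "high") []]
            simp only [List.nil_append]
            refine (sorted_inter_eq _ pvHighFields (PySem.Set.nodup_ofList _) _ (fun x => ?_)).symm
            simp only [mem_high_iff, beq_iff_eq]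
  · -- the masked copies agree (device_id is a medium-level field, so both sides always mask it)
    cases hc : PySem.Dict.contains (PySem.Dict.ofList data) "device_id" <;>
      simp [hlvl, show "device_id" ∈ pvMediumFields from by decide]

-- ===== VERDICT (by name: the statement is the Claim_ definition above) =====
theorem select_fields_to_encrypt_spec : Claim_equal_select_fields_to_encrypt := by
  intro data ctx _
  exact select_fields_to_encrypt_spec' data ctx
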